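-- pv_equiv track=rewrite | github.com/santiagocorrea-ux/IA_lead_tech | open_chrome.py | find_branch_row
-- ===== SOURCE A (Python) =====
-- from typing import Any, Dict, List, Optional
--
-- def normalize(text: Optional[str]) -> str:
--     return " ".join((text or "").split())
--
-- def find_branch_row(rows: List[Dict[str, Any]], branch_name: str, allow_partial: bool = False) -> Optional[Dict[str, Any]]:
--     target = normalize(branch_name).lower()
--
--     exact_matches = [row for row in rows if normalize(row.get("Branch")).lower() == target]
--     if exact_matches:
--         return exact_matches[0]
--
--     if allow_partial:
--         partial_matches = [row for row in rows if target in normalize(row.get("Branch")).lower()]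
--         if len(partial_matches) == 1:
--             return partial_matches[0]
--         if len(partial_matches) > 1:
--             matches = ", ".join(row.get("Branch", "") for row in partial_matches[:10])
--             raise ValueError(f"More than one branch matched '{branch_name}': {matches}")
--
--     return None
-- ===== SOURCE B (Python) =====
-- from typing import Any, Dict, List, Optional
--
-- def normalize(text: Optional[str]) -> str:
--     return " ".join((text or "").split())
--
-- def find_branch_row(rows: List[Dict[str, Any]], branch_name: str, allow_partial: bool = False) -> Optional[Dict[str, Any]]:
--     target = normalize(branch_name).lower()
--     partial: List[Dict[str, Any]] = []
--     for row in rows: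
--         key = normalize(row.get("Branch")).lower()
--         if key == target:
--             return row
--         if allow_partial and target in key:
--             partial.append(row)
--     if len(partial) == 1:
--         return partial[0]
--     if len(partial) > 1:
--         matches = ", ".join(row.get("Branch", "") for row in partial[:10])
--         raise ValueError(f"More than one branch matched '{branch_name}': {matches}")
--     return None
-- ===== Notes on version B (the rewrite author's own statement) =====
-- stated objective: alternative
-- what changed: Replaces A's two full list-comprehension scans (all exact matches, then all partial matches) with a single early-exit loop that returns the first exact match immediately and accumulates partial matches along the way.
import Mathlib
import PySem

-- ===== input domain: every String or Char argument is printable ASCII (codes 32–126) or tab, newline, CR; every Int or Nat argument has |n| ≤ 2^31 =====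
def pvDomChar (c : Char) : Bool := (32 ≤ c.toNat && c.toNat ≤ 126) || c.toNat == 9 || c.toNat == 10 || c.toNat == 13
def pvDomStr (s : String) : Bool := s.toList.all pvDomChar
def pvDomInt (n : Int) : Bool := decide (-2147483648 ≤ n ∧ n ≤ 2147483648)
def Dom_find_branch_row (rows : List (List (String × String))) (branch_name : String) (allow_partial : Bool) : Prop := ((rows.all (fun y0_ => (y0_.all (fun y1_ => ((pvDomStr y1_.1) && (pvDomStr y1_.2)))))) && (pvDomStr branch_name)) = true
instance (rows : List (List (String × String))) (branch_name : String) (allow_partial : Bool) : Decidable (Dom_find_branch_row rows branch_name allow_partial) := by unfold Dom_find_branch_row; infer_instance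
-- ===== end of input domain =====

-- B replaces A's two full scans (exact comprehension, then partial comprehension) with a single
-- early-exit pass that returns the first exact match immediately while accumulating partial matches;
-- objective: alternative decomposition (one pass, early exit).

-- ===== PORT A =====
-- normalize(text): " ".join((text or "").split()); None ↦ "" is folded into getD "Branch" ""
def pvNormalize (t : String) : String := PySem.Str.join " " (PySem.Str.split₀ t)

-- normalize(row.get("Branch")).lower() for one row
def pvKey (row : List (String × String)) : String :=
  PySem.Str.lower (pvNormalize ((PySem.Dict.mk row).getD "Branch" ""))

def find_branch_row (rows : List (List (String × String))) (branch_name : String) (allow_partial : Bool) : Option (List (String × String)) :=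
  let target := PySem.Str.lower (pvNormalize branch_name)
  let exact_matches := rows.filter (fun row => pvKey row == target)
  match exact_matches with
  | e :: _ => some e
  | [] =>
    if allow_partial then
      let partial_matches := rows.filter (fun row => PySem.Str.isIn target (pvKey row))
      if partial_matches.length == 1 then partial_matches.head?
      else if 1 < partial_matches.length then none  -- Python raises ValueError here; excluded by Pre_
      else none
    else none

-- ===== PORT B =====
-- the single early-exit loop of Source B, carrying the growing partial list
def pvAltLoop (target : String) (allow_partial : Bool) :
    List (List (String × String)) → List (List (String × String)) → Option (List (String × String))
  | [], part =>
    if part.length == 1 then part.head?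
    else if 1 < part.length then none  -- Python raises ValueError here; excluded by Pre_
    else none
  | row :: rest, part =>
    let key := pvKey row
    if key == target then some row
    else if allow_partial && PySem.Str.isIn target key then pvAltLoop target allow_partial rest (part ++ [row])
    else pvAltLoop target allow_partial rest part

def find_branch_row_alt (rows : List (List (String × String))) (branch_name : String) (allow_partial : Bool) : Option (List (String × String)) :=
  pvAltLoop (PySem.Str.lower (pvNormalize branch_name)) allow_partial rows []

-- ===== PRECONDITION & SPEC =====
-- Pre_ excludes exactly the inputs where the Python raises ValueError: no exact match,
-- allow_partial set, and more than one partial match.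
def Pre_find_branch_row (rows : List (List (String × String))) (branch_name : String) (allow_partial : Bool) : Prop :=
  (rows.any (fun row => pvKey row == PySem.Str.lower (pvNormalize branch_name))) = true
  ∨ allow_partial = false
  ∨ rows.countP (fun row => PySem.Str.isIn (PySem.Str.lower (pvNormalize branch_name)) (pvKey row)) ≤ 1
instance (rows : List (List (String × String))) (branch_name : String) (allow_partial : Bool) : Decidable (Pre_find_branch_row rows branch_name allow_partial) := by unfold Pre_find_branch_row; infer_instance

def pvWitness_find_branch_row : (List (List (String × String))) × String × Bool :=
  ([[("Branch", "a")]], "a", false)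

def Spec_find_branch_row (rows : List (List (String × String))) (branch_name : String) (allow_partial : Bool) (out : Option (List (String × String))) : Prop := out = find_branch_row_alt rows branch_name allow_partial
instance (rows : List (List (String × String))) (branch_name : String) (allow_partial : Bool) (out : Option (List (String × String))) : Decidable (Spec_find_branch_row rows branch_name allow_partial out) := by unfold Spec_find_branch_row; infer_instance

-- ===== CLAIM (what is proved, stated in full; the proofs are below) =====
def Claim_equal_find_branch_row : Prop := ∀ (rows : List (List (String × String))) (branch_name : String) (allow_partial : Bool), Dom_find_branch_row rows branch_name allow_partial → Pre_find_branch_row rows branch_name allow_partial → Spec_find_branch_row rows branch_name allow_partial (find_branch_row rows branch_name allow_partial)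

-- ===== LEMMAS AND PROOFS =====

-- the loop, unrolled: first exact match wins, otherwise the accumulated ++ remaining partials decide
theorem pvAltLoop_spec (target : String) (ap : Bool) (rows acc : List (List (String × String))) :
    pvAltLoop target ap rows acc =
      match rows.filter (fun row => pvKey row == target) with
      | e :: _ => some e
      | [] =>
        let part := acc ++ (if ap then rows.filter (fun row => PySem.Str.isIn target (pvKey row)) else [])
        if part.length == 1 then part.head?
        else if 1 < part.length then none
        else none := by
  induction rows generalizing acc with
  | nil => simp [pvAltLoop]
  | cons row rest ih =>
    by_cases hx : (pvKey row == target) = true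
    · simp [pvAltLoop, hx]
    · have hxf : (pvKey row == target) = false := by simpa using hx
      by_cases hp : (ap && PySem.Str.isIn target (pvKey row)) = true
      · have hap : ap = true := by
          cases ap <;> simp_all
        have hin : PySem.Str.isIn target (pvKey row) = true := by
          cases h : PySem.Str.isIn target (pvKey row) <;> simp_all
        have hin' : PySem.Chars.isIn target.toList (pvKey row).toList = true := by simpa using hin
        simp only [pvAltLoop, hxf, hp, if_false, if_true, Bool.false_eq_true]
        rw [ih]
        simp [hxf, hin', hap]
      · have hpf : (ap && PySem.Str.isIn target (pvKey row)) = false := by simpa using hp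
        simp only [pvAltLoop, hxf, hpf, if_false, Bool.false_eq_true]
        rw [ih]
        cases hap : ap with
        | false => simp [hxf]
        | true =>
          have hin' : PySem.Chars.isIn target.toList (pvKey row).toList = false := by
            simpa [hap] using hpf
          simp [hxf, hin']

-- ===== VERDICT (by name: the statement is the Claim_ definition above) =====
theorem find_branch_row_spec : Claim_equal_find_branch_row := by
  intro rows branch_name allow_partial _ _
  unfold Spec_find_branch_row find_branch_row find_branch_row_alt
  rw [pvAltLoop_spec]
  cases h : rows.filter (fun row => pvKey row == PySem.Str.lower (pvNormalize branch_name)) with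
  | cons e t => simp [h]
  | nil =>
    cases allow_partial <;> simp [h]
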